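-- pv_equiv track=rewrite | github.com/ArthurMor4is/duplicate-logic-detector-action | scripts/dataset_generation/generate_clones.py | parse_functions_manually
-- ===== SOURCE A (Python) =====
-- from typing import List, Optional, Tuple
--
-- def parse_functions_manually(text: str) -> List[str]:
--     """
--     Manually parse function definitions from text when AST parsing fails.
--
--     Args:
--         text: Raw text containing function definitions
--
--     Returns:
--         List of individual function source codes
--     """
--     functions = []
--     lines = text.splitlines()
--     current_function = []
--     in_function = False
--     base_indent = 0
--
--     for line in lines:
--         stripped = line.strip()
--
--         # Skip empty lines when not in a function
--         if not stripped and not in_function: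
--             continue
--
--         # Check if this is the start of a function
--         if stripped.startswith("def ") and ":" in stripped:
--             # If we were already collecting a function, save it
--             if current_function:
--                 functions.append("\n".join(current_function).strip())
--
--             # Start collecting new function
--             current_function = [line]
--             in_function = True
--             base_indent = len(line) - len(line.lstrip())
--             continue
--
--         if in_function:
--             # Check if we're still inside the function
--             if stripped:  # Non-empty line
--                 current_indent = len(line) - len(line.lstrip())
--                 if current_indent <= base_indent and not line.startswith(' ') and not line.startswith('\t'):
--                     # We've reached a new top-level statement, end current function
--                     if current_function:
--                         functions.append("\n".join(current_function).strip())
--                     current_function = []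
--                     in_function = False
--
--                     # Check if this line starts a new function
--                     if stripped.startswith("def ") and ":" in stripped:
--                         current_function = [line]
--                         in_function = True
--                         base_indent = len(line) - len(line.lstrip())
--                 else:
--                     # Still inside the function
--                     current_function.append(line)
--             else:
--                 # Empty line inside function
--                 current_function.append(line)
--
--     # Don't forget the last function
--     if current_function:
--         functions.append("\n".join(current_function).strip())
--
--     return functions
-- ===== SOURCE B (Python) =====
-- from typing import List
--
--
-- def parse_functions_manually(text: str) -> List[str]:
--     """Scanner re-implementation: no state flags -- an outer cursor walks the
--     lines; at each function-header line an inner loop finds the end of the block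
--     (the next 'def' header or the first non-empty line that is not indented),
--     and the block is sliced out, joined and stripped in one step."""
--
--     def _is_def(ln: str) -> bool:
--         s = ln.strip()
--         return s.startswith("def ") and ":" in s
--
--     def _ends(ln: str) -> bool:
--         return _is_def(ln) or (ln != "" and not ln.startswith(' ') and not ln.startswith('\t'))
--
--     lines = text.splitlines()
--     n = len(lines)
--     result = []
--     pos = 0
--     while pos < n:
--         if _is_def(lines[pos]):
--             j = pos + 1
--             while j < n and not _ends(lines[j]):
--                 j += 1
--             result.append("\n".join(lines[pos:j]).strip())
--             pos = j
--         else: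
--             pos += 1
--     return result
-- ===== Notes on version B (the rewrite author's own statement) =====
-- stated objective: simpler
-- what changed: Replaced A's single-pass state machine (in_function flag, current_function accumulator, base_indent, trailing flush) by a stateless cursor scanner: at each function-header line an inner loop locates the block end (next header or first unindented non-empty line) and the block is sliced, joined and stripped in one step.
import Mathlib
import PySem

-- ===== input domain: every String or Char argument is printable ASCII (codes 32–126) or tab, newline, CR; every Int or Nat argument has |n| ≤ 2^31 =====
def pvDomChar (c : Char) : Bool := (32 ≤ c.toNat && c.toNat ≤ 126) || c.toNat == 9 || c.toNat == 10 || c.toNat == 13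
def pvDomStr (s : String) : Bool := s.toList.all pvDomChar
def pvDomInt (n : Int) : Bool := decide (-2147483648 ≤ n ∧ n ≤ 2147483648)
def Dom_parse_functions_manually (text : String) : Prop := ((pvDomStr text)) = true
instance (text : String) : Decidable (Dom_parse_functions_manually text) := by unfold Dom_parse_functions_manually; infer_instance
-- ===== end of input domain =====

-- B replaces A's single-pass state machine (flags + accumulator + trailing flush) by a
-- stateless cursor scanner that slices each block out directly; same cost, simpler structure.

-- ===== PORT A =====
-- A's loop state: (functions, current_function, in_function, base_indent)
def pmA_step (st : List String × List String × Bool × Int) (line : String) :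
    List String × List String × Bool × Int :=
  let functions := st.1
  let current_function := st.2.1
  let in_function := st.2.2.1
  let base_indent := st.2.2.2
  let stripped := PySem.Str.strip line
  -- skip empty lines when not in a function
  if stripped == "" && !in_function then st
  -- start of a function?
  else if PySem.Str.startswith stripped "def " && PySem.Str.isIn ":" stripped then
    let functions :=
      if current_function ≠ [] then
        functions ++ [PySem.Str.strip (PySem.Str.join "\n" current_function)]
      else functions
    (functions, [line], true,
      PySem.Str.len line - PySem.Str.len (PySem.Str.lstrip line))
  else if in_function then
    if !(stripped == "") then
      let current_indent := PySem.Str.len line - PySem.Str.len (PySem.Str.lstrip line)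
      if current_indent ≤ base_indent && !(PySem.Str.startswith line " ")
          && !(PySem.Str.startswith line "\t") then
        let functions :=
          if current_function ≠ [] then
            functions ++ [PySem.Str.strip (PySem.Str.join "\n" current_function)]
          else functions
        -- (A re-checks for a def header here; transliterated as written)
        if PySem.Str.startswith stripped "def " && PySem.Str.isIn ":" stripped then
          (functions, [line], true,
            PySem.Str.len line - PySem.Str.len (PySem.Str.lstrip line))
        else (functions, [], false, base_indent)
      else (functions, current_function ++ [line], in_function, base_indent)
    else (functions, current_function ++ [line], in_function, base_indent)
  else st

def parse_functions_manually (text : String) : List String :=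
  let lines := PySem.Str.splitlines text
  let st := lines.foldl pmA_step ([], [], false, 0)
  -- don't forget the last function
  if st.2.1 ≠ [] then st.1 ++ [PySem.Str.strip (PySem.Str.join "\n" st.2.1)] else st.1

-- ===== PORT B =====
def pmB_isDef (ln : String) : Bool :=
  let s := PySem.Str.strip ln
  PySem.Str.startswith s "def " && PySem.Str.isIn ":" s

def pmB_ends (ln : String) : Bool :=
  pmB_isDef ln || (!(ln == "") && !(PySem.Str.startswith ln " ") && !(PySem.Str.startswith ln "\t"))

-- inner while loop: advance j to the end of the current block
def pmB_findEnd (lines : List String) (n j : Nat) : Nat :=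
  if j < n then
    if pmB_ends (lines.getD j "") then j else pmB_findEnd lines n (j + 1)
  else j
termination_by n - j

-- needed by pmB_scan's decreasing_by
theorem pmB_le_findEnd (lines : List String) (n j : Nat) : j ≤ pmB_findEnd lines n j := by
  unfold pmB_findEnd
  split
  · split
    · exact le_refl _
    · exact le_trans (Nat.le_succ j) (pmB_le_findEnd lines n (j + 1))
  · exact le_refl _
termination_by n - j

-- outer while loop over the cursor pos
def pmB_scan (lines : List String) (n pos : Nat) (result : List String) : List String :=
  if h : pos < n then
    if pmB_isDef (lines.getD pos "") then
      let j := pmB_findEnd lines n (pos + 1)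
      pmB_scan lines n j
        (result ++ [PySem.Str.strip (PySem.Str.join "\n"
          (PySem.List.slice lines (some (pos : Int)) (some (j : Int))))])
    else pmB_scan lines n (pos + 1) result
  else result
termination_by n - pos
decreasing_by
  · have := pmB_le_findEnd lines n (pos + 1); omega
  · omega

def parse_functions_manually_alt (text : String) : List String :=
  let lines := PySem.Str.splitlines text
  pmB_scan lines lines.length 0 []

-- ===== PRECONDITION & SPEC =====
def Spec_parse_functions_manually (text : String) (out : List String) : Prop := out = parse_functions_manually_alt text
instance (text : String) (out : List String) : Decidable (Spec_parse_functions_manually text out) := by unfold Spec_parse_functions_manually; infer_instance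

-- ===== CLAIM (what is proved, stated in full; the proofs are below) =====
def Claim_equal_parse_functions_manually : Prop := ∀ (text : String), Dom_parse_functions_manually text → Spec_parse_functions_manually text (parse_functions_manually text)

-- ===== LEMMAS AND PROOFS =====

-- every whitespace character of every line is a plain space or a tab
def pmLineOk (ln : String) : Prop :=
  ∀ c ∈ ln.toList, PySem.Chars.isspace c = true → c = ' ' ∨ c = '\t'

def pmOk (lines : List String) : Prop := ∀ ln ∈ lines, pmLineOk ln

-- proof-level description of the common result: the blocks of the given lines
def pmBlocks : List String → List String
  | [] => []
  | l :: ls =>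
    if pmB_isDef l then
      PySem.Str.strip (PySem.Str.join "\n" (l :: ls.takeWhile (fun x => !pmB_ends x)))
        :: pmBlocks (ls.dropWhile (fun x => !pmB_ends x))
    else pmBlocks ls
termination_by l => l.length
decreasing_by
  · exact Nat.lt_succ_of_le (List.length_dropWhile_le _ _)
  · simp

-- ---- the domain gives pmOk for the split lines ----
theorem pm_chars_of_splitlines_go (isB : Char → Bool) (cs cur : List Char)
    (acc : List (List Char)) (l : List Char)
    (hl : l ∈ PySem.Chars.splitlines.go isB cs cur acc) (c : Char) (hc : c ∈ l) :
    (c ∈ cs ∧ isB c = false) ∨ c ∈ cur ∨ ∃ m ∈ acc, c ∈ m := by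
  fun_induction PySem.Chars.splitlines.go isB cs cur acc generalizing c with
  | case1 cur acc h =>
    exact Or.inr (Or.inr ⟨l, List.mem_reverse.mp hl, hc⟩)
  | case2 cur acc h =>
    rcases List.mem_cons.mp (List.mem_reverse.mp hl) with rfl | h2
    · exact Or.inr (Or.inl (List.mem_reverse.mp hc))
    · exact Or.inr (Or.inr ⟨l, h2, hc⟩)
  | case3 rest cur acc ih =>
    rcases ih hl c hc with ⟨h1, h2⟩ | h | ⟨m, hm, hcm⟩
    · exact Or.inl ⟨by simp [h1], h2⟩
    · simp at h
    · rcases List.mem_cons.mp hm with rfl | hm2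
      · exact Or.inr (Or.inl (List.mem_reverse.mp hcm))
      · exact Or.inr (Or.inr ⟨m, hm2, hcm⟩)
  | case4 ch rest cur acc hne hB ih =>
    rcases ih hl c hc with ⟨h1, h2⟩ | h | ⟨m, hm, hcm⟩
    · exact Or.inl ⟨by simp [h1], h2⟩
    · simp at h
    · rcases List.mem_cons.mp hm with rfl | hm2
      · exact Or.inr (Or.inl (List.mem_reverse.mp hcm))
      · exact Or.inr (Or.inr ⟨m, hm2, hcm⟩)
  | case5 ch rest cur acc hne hB ih =>
    rcases ih hl c hc with ⟨h1, h2⟩ | h | ⟨m, hm, hcm⟩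
    · exact Or.inl ⟨by simp [h1], h2⟩
    · rcases List.mem_cons.mp h with rfl | h2
      · exact Or.inl ⟨by simp, by simpa using hB⟩
      · exact Or.inr (Or.inl h2)
    · exact Or.inr (Or.inr ⟨m, hm, hcm⟩)

theorem pm_ok_of_dom (text : String) (h : Dom_parse_functions_manually text) :
    pmOk (PySem.Str.splitlines text) := by
  intro ln hln c hc hsp
  have h' : pvDomStr text = true := h
  have hmem : ln.toList ∈ (PySem.Str.splitlines text).map String.toList :=
    List.mem_map_of_mem hln
  rw [PySem.Str.splitlines_map_toList] at hmem
  unfold PySem.Chars.splitlines at hmem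
  have hres := pm_chars_of_splitlines_go _ _ _ _ _ hmem c hc
  obtain ⟨hin, hB⟩ : c ∈ text.toList ∧ _ = false := by
    rcases hres with h2 | h2 | ⟨m, hm, _⟩
    · exact h2
    · exact absurd h2 (List.not_mem_nil)
    · exact absurd hm (List.not_mem_nil)
  have hdom : pvDomChar c = true := by
    rw [pvDomStr] at h'; exact List.all_eq_true.mp h' c hin
  simp only [pvDomChar, Bool.or_eq_true, Bool.and_eq_true, decide_eq_true_eq, beq_iff_eq] at hdom
  simp only [PySem.Chars.isspace, Bool.or_eq_true, Bool.and_eq_true, decide_eq_true_eq] at hsp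
  simp only [Bool.or_eq_false_iff, decide_eq_false_iff_not] at hB
  have h32 : c.toNat = 32 ∨ c.toNat = 9 := by omega
  have hofn := Char.ofNat_toNat c
  rcases h32 with h32 | h9
  · left; rw [← hofn, h32]
  · right; rw [← hofn, h9]

-- ---- character-level facts about strip / startswith ----
theorem pm_strip_nil_isspace (c : Char) (t : List Char)
    (h : PySem.Chars.strip (c :: t) = []) : PySem.Chars.isspace c = true := by
  by_contra hc
  unfold PySem.Chars.strip PySem.Chars.lstrip PySem.Chars.rstrip at h
  rw [List.dropWhile_cons_of_neg (by simpa using hc)] at h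
  rw [List.reverse_eq_nil_iff, List.dropWhile_eq_nil_iff] at h
  exact hc (h c (by simp))

theorem pm_toList_ne_nil (l : String) (c : Char) (t : List Char) (h : l.toList = c :: t) :
    (l == "") = false := by
  rw [beq_eq_false_iff_ne]
  intro h'; rw [h'] at h; simp at h

theorem pm_sw_head (l : String) (c : Char) (t : List Char) (h : l.toList = c :: t) (p : Char) :
    PySem.Str.startswith l (String.ofList [p]) = (p == c) := by
  rw [PySem.Str.startswith_eq, h, String.toList_ofList]
  simp [PySem.Chars.startswith, List.isPrefixOf]

theorem pm_isDef_false_of_strip_nil (ln : String)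
    (h : (PySem.Str.strip ln == "") = true) : pmB_isDef ln = false := by
  have hnil : PySem.Chars.strip ln.toList = [] := by
    have h1 := (beq_iff_eq).mp h
    have h2 := congrArg String.toList h1
    rwa [PySem.Str.toList_strip] at h2
  show (PySem.Str.startswith (PySem.Str.strip ln) "def " && _) = false
  rw [PySem.Str.startswith_eq, PySem.Str.toList_strip, hnil]
  simp [PySem.Chars.startswith]

theorem pm_ends_false_of_strip_nil (ln : String) (hok : pmLineOk ln)
    (h : (PySem.Str.strip ln == "") = true) : pmB_ends ln = false := by
  have hnil : PySem.Chars.strip ln.toList = [] := by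
    have h1 := (beq_iff_eq).mp h
    have h2 := congrArg String.toList h1
    rwa [PySem.Str.toList_strip] at h2
  have hdef := pm_isDef_false_of_strip_nil ln h
  unfold pmB_ends
  rw [hdef]
  cases hc : ln.toList with
  | nil =>
    have hln : (ln == "") = true := by
      rw [beq_iff_eq]; exact String.toList_inj.mp (by simp [hc])
    simp [hln]
  | cons c t =>
    have hsp := pm_strip_nil_isspace c t (hc ▸ hnil)
    rcases hok c (by rw [hc]; simp) hsp with rfl | rfl
    · have hsw := pm_sw_head ln ' ' t hc ' '
      simp at hsw
      simp [hsw]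
    · have hsw := pm_sw_head ln '\t' t hc '\t'
      simp at hsw
      simp [hsw]

-- A's dedent test equals B's "unindented non-empty line" test on ok lines
theorem pm_cond_eq (l : String) (b : Int) (hok : pmLineOk l) (hb : 0 ≤ b)
    (hstr : (PySem.Str.strip l == "") = false) :
    (decide (PySem.Str.len l - PySem.Str.len (PySem.Str.lstrip l) ≤ b) &&
      !(PySem.Str.startswith l " ") && !(PySem.Str.startswith l "\t"))
      = (!(l == "") && !(PySem.Str.startswith l " ") && !(PySem.Str.startswith l "\t")) := by
  cases hc : l.toList with
  | nil =>
    exfalso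
    have h1 : PySem.Str.strip l = "" := by
      apply String.toList_inj.mp
      rw [PySem.Str.toList_strip, hc]; rfl
    rw [h1] at hstr; simp at hstr
  | cons c t =>
    have hne := pm_toList_ne_nil l c t hc
    have hsw1 : PySem.Str.startswith l " " = (' ' == c) := pm_sw_head l c t hc ' '
    have hsw2 : PySem.Str.startswith l "\t" = ('\t' == c) := pm_sw_head l c t hc '\t'
    by_cases hsp : PySem.Chars.isspace c = true
    · rcases hok c (by rw [hc]; simp) hsp with rfl | rfl
      · simp at hsw1; simp [hsw1]
      · simp at hsw2; simp [hsw2]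
    · have hl : PySem.Chars.lstrip l.toList = l.toList := by
        rw [hc]; exact List.dropWhile_cons_of_neg (by simpa using hsp)
      have hlen : PySem.Str.len l - PySem.Str.len (PySem.Str.lstrip l) = 0 := by
        simp [PySem.Str.len, PySem.Str.lstrip, hl]
      have h1 : (' ' == c) = false := by
        rw [beq_eq_false_iff_ne]; rintro rfl; exact hsp rfl
      have h2 : ('\t' == c) = false := by
        rw [beq_eq_false_iff_ne]; rintro rfl; exact hsp rfl
      rw [hsw1, hsw2, h1, h2, hlen, hne]
      simp [hb]

-- ---- A's fold step, written out branch by branch ----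
theorem pmA_step_eq (fns cur : List String) (inf : Bool) (b : Int) (line : String) :
    pmA_step (fns, cur, inf, b) line =
      if PySem.Str.strip line == "" && !inf then (fns, cur, inf, b)
      else if pmB_isDef line then
        ((if cur ≠ [] then fns ++ [PySem.Str.strip (PySem.Str.join "\n" cur)] else fns),
          [line], true, PySem.Str.len line - PySem.Str.len (PySem.Str.lstrip line))
      else if inf then
        if !(PySem.Str.strip line == "") then
          if decide (PySem.Str.len line - PySem.Str.len (PySem.Str.lstrip line) ≤ b)
              && !(PySem.Str.startswith line " ") && !(PySem.Str.startswith line "\t") then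
            if pmB_isDef line then
              ((if cur ≠ [] then fns ++ [PySem.Str.strip (PySem.Str.join "\n" cur)] else fns),
                [line], true, PySem.Str.len line - PySem.Str.len (PySem.Str.lstrip line))
            else
              ((if cur ≠ [] then fns ++ [PySem.Str.strip (PySem.Str.join "\n" cur)] else fns),
                [], false, b)
          else (fns, cur ++ [line], inf, b)
        else (fns, cur ++ [line], inf, b)
      else (fns, cur, inf, b) := rfl

theorem pm_indent_nonneg (l : String) :
    0 ≤ PySem.Str.len l - PySem.Str.len (PySem.Str.lstrip l) := by
  simp [PySem.Str.len, PySem.Str.lstrip, PySem.Chars.lstrip]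
  exact_mod_cast List.length_dropWhile_le _ _

def pmFin (st : List String × List String × Bool × Int) : List String :=
  if st.2.1 ≠ [] then st.1 ++ [PySem.Str.strip (PySem.Str.join "\n" st.2.1)] else st.1

-- ---- A's fold computes pmBlocks (both loop states at once) ----
theorem pm_fold_both (lines : List String) (hok : pmOk lines) :
    (∀ fns b, pmFin (lines.foldl pmA_step (fns, [], false, b)) = fns ++ pmBlocks lines) ∧
    (∀ fns cur b, cur ≠ [] → 0 ≤ b →
      pmFin (lines.foldl pmA_step (fns, cur, true, b)) =
        fns ++ [PySem.Str.strip (PySem.Str.join "\n"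
          (cur ++ lines.takeWhile (fun x => !pmB_ends x)))]
          ++ pmBlocks (lines.dropWhile (fun x => !pmB_ends x))) := by
  induction lines with
  | nil =>
    constructor
    · intro fns b; simp [pmFin, pmBlocks]
    · intro fns cur b hcur hb
      simp [pmFin, pmBlocks, hcur]
  | cons line ls ih =>
    have hokl : pmLineOk line := hok line (by simp)
    have hoks : pmOk ls := fun l hl => hok l (by simp [hl])
    obtain ⟨ihOut, ihIn⟩ := ih hoks
    constructor
    · intro fns b
      rw [List.foldl_cons, pmA_step_eq]
      by_cases hs : (PySem.Str.strip line == "") = true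
      · have hd := pm_isDef_false_of_strip_nil line hs
        rw [if_pos (by simp [hs]), ihOut fns b, pmBlocks, if_neg (by simp [hd])]
      · by_cases hd : pmB_isDef line = true
        · rw [if_neg (by simp [hs]), if_pos hd, if_neg (by simp)]
          rw [ihIn fns [line] _ (by simp) (pm_indent_nonneg line)]
          rw [pmBlocks, if_pos hd]
          simp
        · rw [if_neg (by simp [hs]), if_neg (by simp [hd]), if_neg (by simp)]
          rw [ihOut fns b, pmBlocks, if_neg (by simp [hd])]
    · intro fns cur b hcur hb
      rw [List.foldl_cons, pmA_step_eq]
      by_cases hd : pmB_isDef line = true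
      · have hends : pmB_ends line = true := by simp [pmB_ends, hd]
        rw [if_neg (by simp), if_pos hd, if_pos hcur]
        rw [ihIn _ [line] _ (by simp) (pm_indent_nonneg line)]
        rw [List.takeWhile_cons_of_neg (by simp [hends]),
          List.dropWhile_cons_of_neg (by simp [hends]), pmBlocks, if_pos hd]
        simp
      · by_cases hs : (PySem.Str.strip line == "") = true
        · have hends := pm_ends_false_of_strip_nil line hokl hs
          rw [if_neg (by simp), if_neg (by simp [hd]), if_pos rfl, if_neg (by simp [hs])]
          rw [ihIn fns (cur ++ [line]) b (by simp) hb]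
          rw [List.takeWhile_cons_of_pos (by simp [hends]),
            List.dropWhile_cons_of_pos (by simp [hends])]
          simp
        · have hcond := pm_cond_eq line b hokl hb (by simpa using hs)
          have hends : pmB_ends line
              = (!(line == "") && !(PySem.Str.startswith line " ")
                  && !(PySem.Str.startswith line "\t")) := by
            simp [pmB_ends, hd]
          rw [if_neg (by simp), if_neg (by simp [hd]), if_pos rfl, if_pos (by simp [hs])]
          by_cases he : pmB_ends line = true
          · rw [if_pos (by rw [hcond, ← hends]; exact he), if_neg (by simp [hd]), if_pos hcur]
            rw [ihOut _ b]
            rw [List.takeWhile_cons_of_neg (by simp [he]),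
              List.dropWhile_cons_of_neg (by simp [he]), pmBlocks, if_neg (by simp [hd])]
            simp
          · rw [if_neg (by rw [hcond, ← hends]; simpa using he)]
            rw [ihIn fns (cur ++ [line]) b (by simp) hb]
            rw [List.takeWhile_cons_of_pos (by simpa using he),
              List.dropWhile_cons_of_pos (by simpa using he)]
            simp

-- ---- B's index recursion computes pmBlocks ----
theorem pm_findEnd_eq (lines : List String) (j : Nat) (hj : j ≤ lines.length) :
    pmB_findEnd lines lines.length j
      = j + ((lines.drop j).takeWhile (fun x => !pmB_ends x)).length := by
  unfold pmB_findEnd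
  by_cases h : j < lines.length
  · have hdrop : lines.drop j = lines[j] :: lines.drop (j + 1) :=
      List.drop_eq_getElem_cons h
    have hget : lines.getD j "" = lines[j] := List.getD_eq_getElem lines _ h
    rw [if_pos h, hget, hdrop]
    by_cases he : pmB_ends lines[j] = true
    · rw [if_pos he, List.takeWhile_cons_of_neg (by simp [he])]
      simp
    · rw [if_neg he, List.takeWhile_cons_of_pos (by simpa using he),
        pm_findEnd_eq lines (j + 1) h]
      simp; omega
  · rw [if_neg h]
    rw [List.drop_eq_nil_of_le (by omega)]
    simp
termination_by lines.length - j

theorem pm_slice_block (lines : List String) (pos : Nat) (hp : pos < lines.length) :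
    PySem.List.slice lines (some (pos : Int))
        (some ((pos + 1 + ((lines.drop (pos + 1)).takeWhile (fun x => !pmB_ends x)).length : Nat) : Int))
      = lines[pos] :: (lines.drop (pos + 1)).takeWhile (fun x => !pmB_ends x) := by
  rw [PySem.List.slice_natCast]
  have h1 : pos + 1 + ((lines.drop (pos + 1)).takeWhile (fun x => !pmB_ends x)).length - pos
      = 1 + ((lines.drop (pos + 1)).takeWhile (fun x => !pmB_ends x)).length := by omega
  rw [h1, List.drop_eq_getElem_cons hp]
  rw [Nat.add_comm 1, List.take_succ_cons]
  have h2 := List.take_left (l₁ := (lines.drop (pos + 1)).takeWhile (fun x => !pmB_ends x))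
    (l₂ := (lines.drop (pos + 1)).dropWhile (fun x => !pmB_ends x))
  rw [List.takeWhile_append_dropWhile] at h2
  rw [h2]

theorem pm_scan_eq (lines : List String) (pos : Nat) (acc : List String) (hp : pos ≤ lines.length) :
    pmB_scan lines lines.length pos acc = acc ++ pmBlocks (lines.drop pos) := by
  unfold pmB_scan
  by_cases h : pos < lines.length
  · have hdrop : lines.drop pos = lines[pos] :: lines.drop (pos + 1) :=
      List.drop_eq_getElem_cons h
    have hget : lines.getD pos "" = lines[pos] := List.getD_eq_getElem lines _ h
    rw [dif_pos h, hget]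
    by_cases hd : pmB_isDef lines[pos] = true
    · rw [if_pos hd]
      have hfe := pm_findEnd_eq lines (pos + 1) (by omega)
      set tw := ((lines.drop (pos + 1)).takeWhile (fun x => !pmB_ends x)) with htw
      have htl : tw.length ≤ (lines.drop (pos + 1)).length := (List.takeWhile_prefix _).length_le
      have hlen : pos + 1 + tw.length ≤ lines.length := by
        simp at htl; omega
      rw [hfe]
      rw [pm_scan_eq lines (pos + 1 + tw.length) _ hlen]
      have hsl := pm_slice_block lines pos h
      rw [← htw] at hsl
      have hdw : lines.drop (pos + 1 + tw.length)
          = (lines.drop (pos + 1)).dropWhile (fun x => !pmB_ends x) := by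
        have h3 := List.drop_left (l₁ := (lines.drop (pos + 1)).takeWhile (fun x => !pmB_ends x))
          (l₂ := (lines.drop (pos + 1)).dropWhile (fun x => !pmB_ends x))
        rw [List.takeWhile_append_dropWhile] at h3
        rw [← htw] at h3
        rw [← h3, List.drop_drop]
      rw [hdw, hsl, hdrop, pmBlocks]
      rw [if_pos hd]
      simp
      rw [htw]
    · rw [if_neg hd, pm_scan_eq lines (pos + 1) acc (by omega), hdrop]
      rw [pmBlocks]
      simp [hd]
  · rw [dif_neg h, List.drop_eq_nil_of_le (by omega)]
    simp [pmBlocks]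
termination_by lines.length - pos
decreasing_by
  · have := (List.takeWhile_prefix (l := lines.drop (pos+1)) (fun x => !pmB_ends x)).length_le; omega
  · omega

-- ===== VERDICT (by name: the statement is the Claim_ definition above) =====
theorem parse_functions_manually_spec : Claim_equal_parse_functions_manually := by
  intro text hdom
  unfold Spec_parse_functions_manually parse_functions_manually parse_functions_manually_alt
  rw [pm_scan_eq _ 0 [] (Nat.zero_le _)]
  show pmFin (List.foldl pmA_step ([], [], false, 0) (PySem.Str.splitlines text)) = _
  rw [(pm_fold_both _ (pm_ok_of_dom text hdom)).1 [] 0]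
  simp
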